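-- pv_equiv track=rewrite | github.com/dustyleary/langproto | lang.1/sexpr.py | parse_atom_chars
-- ===== SOURCE A (Python) =====
-- import string
--
-- def eat_whitespace(txt):
--     i = 0
--     for i,c in enumerate(txt):
--         if c not in string.whitespace:
--             return txt[i:]
--     return ''
--
-- terminate_atom = set('()"\'') | set(string.whitespace)
--
-- def parse_atom_chars(txt):
--     txt = eat_whitespace(txt)
--     if txt[0] in terminate_atom:
--         raise Exception('not an atom: %r' % txt)
--     atom = ''
--     for i,c in enumerate(txt):
--         if c in terminate_atom:
--             return atom, txt[i:]
--         else:
--             atom += c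
--     return atom, ''
-- ===== SOURCE B (Python) =====
-- import re
-- import string
--
-- _atom = re.compile(r'[^()"\'\s]+')
--
-- def parse_atom_chars(txt):
--     txt = txt.lstrip(string.whitespace)
--     m = _atom.match(txt)
--     if not m:
--         raise Exception('not an atom: %r' % txt)
--     atom = m.group()
--     return atom, txt[len(atom):]
-- ===== Notes on version B (the rewrite author's own statement) =====
-- stated objective: faster
-- what changed: Replaces the index loop of eat_whitespace with str.lstrip and the char-by-char accumulator loop (with quadratic string concatenation) with a single precompiled-regex match that yields the atom and its length in one step.
import Mathlib
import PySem

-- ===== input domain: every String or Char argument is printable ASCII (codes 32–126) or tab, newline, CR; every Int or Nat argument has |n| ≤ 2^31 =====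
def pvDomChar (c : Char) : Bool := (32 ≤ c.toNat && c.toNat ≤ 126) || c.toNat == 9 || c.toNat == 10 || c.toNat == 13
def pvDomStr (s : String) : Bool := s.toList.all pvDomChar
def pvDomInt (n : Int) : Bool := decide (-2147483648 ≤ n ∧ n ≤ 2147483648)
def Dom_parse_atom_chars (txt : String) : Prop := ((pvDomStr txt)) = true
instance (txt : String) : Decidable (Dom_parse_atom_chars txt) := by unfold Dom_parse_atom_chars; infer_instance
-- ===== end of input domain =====

-- B replaces the manual whitespace-eating and char-accumulation loops by lstrip + one regex
-- match (idiomatic); return values agree on every input where A returns.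

-- string.whitespace membership (shared character predicate)
def pvIsWS (c : Char) : Bool := c = ' ' || c = '\t' || c = '\n' || c = '\x0d' || c = '\x0b' || c = '\x0c'
-- terminate_atom = set('()"\'') | set(string.whitespace)
def pvIsTerm (c : Char) : Bool := c = '(' || c = ')' || c = '"' || c = '\'' || pvIsWS c

-- ===== PORT A =====
-- eat_whitespace: scan for first non-whitespace char, return suffix from there, else ''
def pvEatWS : List Char → List Char
  | [] => []
  | c :: cs => if pvIsWS c then pvEatWS cs else c :: cs

-- the accumulator loop of parse_atom_chars: atom grows char by char until a terminator
def pvLoopA : List Char → List Char → List Char × List Char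
  | atom, [] => (atom, [])
  | atom, c :: cs => if pvIsTerm c then (atom, c :: cs) else pvLoopA (atom ++ [c]) cs

def parse_atom_chars (txt : String) : String × String :=
  let t := pvEatWS txt.toList
  -- Python raises here when t is empty (IndexError) or t's head is a terminator; Pre_ excludes those
  let p := pvLoopA [] t
  (String.mk p.1, String.mk p.2)

-- ===== PORT B =====
-- lstrip(string.whitespace); regex [^()"'\s]+ match = longest non-terminator prefix; rest by length
def parse_atom_chars_alt (txt : String) : String × String :=
  let t := txt.toList.dropWhile pvIsWS
  let atom := t.takeWhile (fun c => !pvIsTerm c)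
  (String.mk atom, String.mk (t.drop atom.length))

-- ===== PRECONDITION & SPEC =====
-- Exactly where Python A returns: after stripping leading whitespace some char remains and it is
-- not a terminator (headD '(' makes the empty case a terminator, so both raise-cases are excluded).
def Pre_parse_atom_chars (txt : String) : Prop :=
  pvIsTerm ((txt.toList.dropWhile pvIsWS).headD '(') = false
instance (txt : String) : Decidable (Pre_parse_atom_chars txt) := by unfold Pre_parse_atom_chars; infer_instance
def pvWitness_parse_atom_chars : String := "  foo("
def Spec_parse_atom_chars (txt : String) (out : String × String) : Prop := out = parse_atom_chars_alt txt
instance (txt : String) (out : String × String) : Decidable (Spec_parse_atom_chars txt out) := by unfold Spec_parse_atom_chars; infer_instance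

-- ===== CLAIM (what is proved, stated in full; the proofs are below) =====
def Claim_equal_parse_atom_chars : Prop := ∀ (txt : String), Dom_parse_atom_chars txt → Pre_parse_atom_chars txt → Spec_parse_atom_chars txt (parse_atom_chars txt)

-- ===== LEMMAS AND PROOFS =====

theorem pvEatWS_eq_dropWhile (l : List Char) : pvEatWS l = l.dropWhile pvIsWS := by
  induction l with
  | nil => rfl
  | cons c cs ih =>
      simp only [pvEatWS, List.dropWhile]
      by_cases h : pvIsWS c = true <;> simp [h, ih]

theorem pvLoopA_eq (atom l : List Char) :
    pvLoopA atom l = (atom ++ l.takeWhile (fun c => !pvIsTerm c),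
                      l.drop (l.takeWhile (fun c => !pvIsTerm c)).length) := by
  induction l generalizing atom with
  | nil => simp [pvLoopA]
  | cons c cs ih =>
      simp only [pvLoopA, List.takeWhile]
      by_cases h : pvIsTerm c = true
      · simp [h]
      · simp only [h]
        simp only [Bool.not_false, ih, List.length_cons, List.drop_succ_cons]
        simp [h]

-- ===== VERDICT (by name: the statement is the Claim_ definition above) =====
theorem parse_atom_chars_spec : Claim_equal_parse_atom_chars := by
  intro txt _ _
  unfold Spec_parse_atom_chars parse_atom_chars parse_atom_chars_alt
  simp [pvEatWS_eq_dropWhile, pvLoopA_eq]
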